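-- pv_equiv track=rewrite | github.com/pmodels/mpich | test/mpi/maint/render-topo.py | create_coord_node_labels
-- ===== SOURCE A (Python) =====
-- def create_coord_node_labels(coords):
--     result = []
--     coord_combo = ''
--     for prefix, coord in zip(['G', 'S', 'P'], reversed(coords)):
--         if 0 == len(coord_combo):
--             coord_combo = coord
--         else:
--             coord_combo += "." + coord
--         result.append(prefix + coord_combo)
--     return result
-- ===== SOURCE B (Python) =====
-- def create_coord_node_labels(coords):
--     rev = list(reversed(coords))
--     return [prefix + '.'.join(rev[:i + 1])
--             for i, prefix in enumerate(['G', 'S', 'P'][:len(rev)])]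
-- ===== Notes on version B (the rewrite author's own statement) =====
-- stated objective: simpler
-- what changed: Replaces the running string accumulator with a per-level '.'.join over a slice of the reversed list, emitted by a single comprehension.
-- intended difference: On lists of two or more coords whose last element is the empty string, A's empty-accumulator check silently drops the dot separator at the next level (e.g. 'S1' instead of 'S.1'); B always keeps one dot per level, which is the intended hierarchical label format. — e.g. on create_coord_node_labels(["1", ""]): A returns ["G", "S1"], B returns ["G", "S.1"]
import Mathlib
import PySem

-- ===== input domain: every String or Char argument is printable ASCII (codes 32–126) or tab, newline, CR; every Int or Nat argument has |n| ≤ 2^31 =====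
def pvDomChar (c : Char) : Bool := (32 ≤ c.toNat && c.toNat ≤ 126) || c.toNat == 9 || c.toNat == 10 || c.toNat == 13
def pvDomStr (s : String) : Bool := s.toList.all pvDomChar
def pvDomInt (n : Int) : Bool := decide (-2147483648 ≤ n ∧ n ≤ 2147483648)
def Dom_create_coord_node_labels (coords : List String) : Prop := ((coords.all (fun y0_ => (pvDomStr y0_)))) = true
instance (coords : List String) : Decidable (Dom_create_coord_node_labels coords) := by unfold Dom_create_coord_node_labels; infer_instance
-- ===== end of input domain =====

-- B rebuilds each label by joining a slice of the reversed list instead of threading A's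
-- running string accumulator (objective: simpler, one comprehension).

-- ===== PORT A =====
def create_coord_node_labels (coords : List String) : List String :=
  (List.foldl (fun (st : List String × String) (pc : String × String) =>
      let combo := if (0 : Int) = PySem.Str.len st.2 then pc.2 else st.2 ++ "." ++ pc.2
      (st.1 ++ [pc.1 ++ combo], combo))
    ([], "") (List.zip ["G", "S", "P"] coords.reverse)).1

-- ===== PORT B =====
def create_coord_node_labels_alt (coords : List String) : List String :=
  let rev := coords.reverse
  (PySem.List.enumerate (PySem.List.slice ["G", "S", "P"] none (some (PySem.List.len rev))) 0).map
    (fun ip => ip.2 ++ PySem.Str.join "." (PySem.List.slice rev none (some (ip.1 + 1))))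

-- ===== PRECONDITION & SPEC =====
-- On lists of two or more coords whose last element is the empty string, A's empty-accumulator
-- check silently drops the dot separator at the next level (leftover empty-combo state, e.g.
-- 'S1' instead of 'S.1'); B always keeps one dot per level, the intended hierarchical format.
def D_create_coord_node_labels (coords : List String) : Prop :=
  2 ≤ coords.length ∧ coords.getLast? = some ""
instance (coords : List String) : Decidable (D_create_coord_node_labels coords) := by
  unfold D_create_coord_node_labels; infer_instance

def Spec_create_coord_node_labels (coords : List String) (out : List String) : Prop :=
  ¬ D_create_coord_node_labels coords → out = create_coord_node_labels_alt coords
instance (coords : List String) (out : List String) : Decidable (Spec_create_coord_node_labels coords out) := by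
  unfold Spec_create_coord_node_labels; infer_instance

def pvDiffWitness_create_coord_node_labels : List String := ["1", ""]
def pvDiffWitnessOut_create_coord_node_labels : (List String) × (List String) :=
  (["G", "S1"], ["G", "S.1"])

-- ===== CLAIM (what is proved, stated in full; the proofs are below) =====
def Claim_unchanged_create_coord_node_labels : Prop := ∀ (coords : List String), Dom_create_coord_node_labels coords → Spec_create_coord_node_labels coords (create_coord_node_labels coords)
def Claim_changed_create_coord_node_labels : Prop := Dom_create_coord_node_labels (pvDiffWitness_create_coord_node_labels) ∧ D_create_coord_node_labels (pvDiffWitness_create_coord_node_labels) ∧ create_coord_node_labels (pvDiffWitness_create_coord_node_labels) = pvDiffWitnessOut_create_coord_node_labels.1 ∧ create_coord_node_labels_alt (pvDiffWitness_create_coord_node_labels) = pvDiffWitnessOut_create_coord_node_labels.2 ∧ pvDiffWitnessOut_create_coord_node_labels.1 ≠ pvDiffWitnessOut_create_coord_node_labels.2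
def Claim_exact_create_coord_node_labels : Prop := ∀ (coords : List String), Dom_create_coord_node_labels coords → D_create_coord_node_labels coords → create_coord_node_labels coords ≠ create_coord_node_labels_alt coords

-- ===== LEMMAS AND PROOFS =====

theorem pv_tight_two (coords : List String) (y : String) (hr : coords.reverse = ["", y]) :
    create_coord_node_labels coords ≠ create_coord_node_labels_alt coords := by
  intro heq
  have hs : PySem.List.slice ["G","S","P"] none (some (2:Int)) = ["G","S"] := by rfl
  have s1 : PySem.List.slice [("":String), y] none (some (1:Int)) = [""] := by rfl
  have s2 : PySem.List.slice [("":String), y] none (some (2:Int)) = ["", y] := by rfl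
  simp [create_coord_node_labels, create_coord_node_labels_alt, hr, hs, s1, s2,
    PySem.List.enumerate_cons, PySem.Str.join, PySem.Chars.join_singleton,
    PySem.Chars.join_cons_cons, String.ext_iff] at heq

theorem pv_tight_big (coords : List String) (y z : String) (rest : List String)
    (hr : coords.reverse = "" :: y :: z :: rest) :
    create_coord_node_labels coords ≠ create_coord_node_labels_alt coords := by
  intro heq
  have hs : PySem.List.slice ["G","S","P"] none (some ((rest.length:Int) + 1 + 1 + 1)) = ["G","S","P"] := by
    have e : ((rest.length:Int)+1+1+1) = ((rest.length+3 : Nat):Int) := by push_cast; ring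
    rw [e, PySem.List.slice_to_natCast]
    exact List.take_of_length_le (by simp)
  have s1 : PySem.List.slice (("":String)::y::z::rest) none (some (1:Int)) = [""] := by rfl
  have s2 : PySem.List.slice (("":String)::y::z::rest) none (some (2:Int)) = ["", y] := by rfl
  have s3 : PySem.List.slice (("":String)::y::z::rest) none (some (3:Int)) = ["", y, z] := by rfl
  simp [create_coord_node_labels, create_coord_node_labels_alt, hr, hs, s1, s2, s3,
    PySem.List.enumerate_cons, PySem.Str.join, PySem.Chars.join_singleton,
    PySem.Chars.join_cons_cons, String.ext_iff] at heq

theorem pv_case_nil (coords : List String) (hr : coords.reverse = []) :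
    create_coord_node_labels coords = create_coord_node_labels_alt coords := by
  simp [create_coord_node_labels, create_coord_node_labels_alt, hr,
    PySem.List.slice_to ["G","S","P"] (b := (0:Int)) (by norm_num)]

theorem pv_case_one (coords : List String) (x : String) (hr : coords.reverse = [x]) :
    create_coord_node_labels coords = create_coord_node_labels_alt coords := by
  have hs : PySem.List.slice ["G","S","P"] none (some (1:Int)) = ["G"] := by
    rfl
  have s1 : PySem.List.slice [x] none (some (1:Int)) = [x] := by
    rfl
  simp [create_coord_node_labels, create_coord_node_labels_alt, hr, hs, s1,
    PySem.List.enumerate_cons, PySem.Str.join, PySem.Chars.join_singleton]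

theorem pv_case_two (coords : List String) (x y : String) (h : x ≠ "")
    (hr : coords.reverse = [x, y]) :
    create_coord_node_labels coords = create_coord_node_labels_alt coords := by
  have hlen : x.length ≠ 0 := by simpa [String.length_eq_zero_iff] using h
  have hne : ¬((0:Int) = (x.length:Int)) := by omega
  have hs : PySem.List.slice ["G","S","P"] none (some (2:Int)) = ["G","S"] := by
    rfl
  have s1 : PySem.List.slice [x, y] none (some (1:Int)) = [x] := by
    rfl
  have s2 : PySem.List.slice [x, y] none (some (2:Int)) = [x, y] := by
    rfl
  simp [create_coord_node_labels, create_coord_node_labels_alt, hr, hs, s1, s2,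
    PySem.List.enumerate_cons, PySem.Str.join, PySem.Chars.join_singleton,
    PySem.Chars.join_cons_cons, hne, String.ext_iff]

theorem pv_case_big (coords : List String) (x y z : String) (rest : List String) (h : x ≠ "")
    (hr : coords.reverse = x :: y :: z :: rest) :
    create_coord_node_labels coords = create_coord_node_labels_alt coords := by
  have hlen : x.length ≠ 0 := by simpa [String.length_eq_zero_iff] using h
  have hne : ¬((0:Int) = (x.length:Int)) := by omega
  have hne2 : ¬((0:Int) = (x.length:Int) + (".".length:Int) + (y.length:Int)) := by
    rw [show (".".length) = 1 from rfl]
    omega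
  have hs : PySem.List.slice ["G","S","P"] none (some ((rest.length:Int) + 1 + 1 + 1)) = ["G","S","P"] := by
    have e : ((rest.length:Int)+1+1+1) = ((rest.length+3 : Nat):Int) := by push_cast; ring
    rw [e, PySem.List.slice_to_natCast]
    exact List.take_of_length_le (by simp)
  have s1 : PySem.List.slice (x::y::z::rest) none (some (1:Int)) = [x] := by
    rfl
  have s2 : PySem.List.slice (x::y::z::rest) none (some (2:Int)) = [x,y] := by
    rfl
  have s3 : PySem.List.slice (x::y::z::rest) none (some (3:Int)) = [x,y,z] := by
    rfl
  simp [create_coord_node_labels, create_coord_node_labels_alt, hr, hs, s1, s2, s3,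
    PySem.List.enumerate_cons, PySem.Str.join, PySem.Chars.join_singleton,
    PySem.Chars.join_cons_cons, hne, hne2, String.ext_iff]

-- ===== VERDICT (by name: the statement is the Claim_ definition above) =====
theorem create_coord_node_labels_spec : Claim_unchanged_create_coord_node_labels := by
  intro coords _ hnd
  rcases hrev : coords.reverse with _ | ⟨x, t⟩
  · exact pv_case_nil coords hrev
  · have hx : x ≠ "" ∨ t = [] := by
      rcases t with _ | ⟨y, t'⟩
      · exact Or.inr rfl
      · left
        intro hx0
        apply hnd
        constructor
        · have := congrArg List.length hrev
          simp at this
          omega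
        · have := List.head?_reverse (l := coords)
          rw [hrev, hx0] at this
          exact this.symm
    rcases t with _ | ⟨y, _ | ⟨z, rest⟩⟩
    · exact pv_case_one coords x hrev
    · exact pv_case_two coords x y (hx.resolve_right (by simp)) hrev
    · exact pv_case_big coords x y z rest (hx.resolve_right (by simp)) hrev

theorem create_coord_node_labels_changed : Claim_changed_create_coord_node_labels := by
  unfold Claim_changed_create_coord_node_labels; decide

theorem create_coord_node_labels_tight : Claim_exact_create_coord_node_labels := by
  intro coords _ hd
  have hh : coords.reverse.head? = some "" := by
    rw [List.head?_reverse (l := coords)]; exact hd.2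
  rcases hrev : coords.reverse with _ | ⟨x, _ | ⟨y, t⟩⟩
  · exfalso
    have h2 := hd.1
    have := congrArg List.length hrev
    simp at this
    simp [this] at h2
  · exfalso
    have h2 := hd.1
    have := congrArg List.length hrev
    simp at this
    omega
  · have hx : x = "" := by rw [hrev] at hh; simpa using hh
    subst hx
    rcases t with _ | ⟨z, rest⟩
    · exact pv_tight_two coords y hrev
    · exact pv_tight_big coords y z rest hrev
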